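-- pv_equiv track=rewrite | github.com/myanhon/ISCRIPT | src/Week_5/Cryptogrammen.py | vraagtekensOplossing
-- ===== SOURCE A (Python) =====
-- def vraagtekensOplossing(oplossing):
--     vraagTekens = []
--     length = len(oplossing)
--
--     i = 0
--     while(i < length):
--         char = oplossing[i]
--         if(char == "?"):
--             vraagTekens.append(i)
--         i += 1
--
--     return vraagTekens
-- ===== SOURCE B (Python) =====
-- def vraagtekensOplossing(oplossing):
--     vraagTekens = []
--     start = 0
--     while True:
--         idx = oplossing.find('?', start)
--         if idx == -1:
--             break
--         vraagTekens.append(idx)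
--         start = idx + 1
--     return vraagTekens
-- ===== Notes on version B (the rewrite author's own statement) =====
-- stated objective: faster
-- what changed: Replaces the per-character while loop with repeated str.find('?', start) calls that hop directly between matches, accumulating indices until find returns -1.
import Mathlib
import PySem

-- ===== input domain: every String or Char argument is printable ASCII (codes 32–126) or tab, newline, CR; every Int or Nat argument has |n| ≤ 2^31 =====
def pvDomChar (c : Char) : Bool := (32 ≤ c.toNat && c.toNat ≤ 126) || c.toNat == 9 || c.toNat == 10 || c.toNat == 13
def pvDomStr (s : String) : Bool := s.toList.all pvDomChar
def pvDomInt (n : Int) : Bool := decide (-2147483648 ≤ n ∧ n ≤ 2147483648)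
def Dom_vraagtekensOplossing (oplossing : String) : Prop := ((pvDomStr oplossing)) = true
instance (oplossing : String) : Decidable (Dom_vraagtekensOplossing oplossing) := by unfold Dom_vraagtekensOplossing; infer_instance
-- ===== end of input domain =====

-- B replaces A's per-character index loop with repeated find('?', start) hops; return values proved equal.

-- ===== PORT A =====
-- A's while loop: i from 0 while i < length, read oplossing[i], append i when it is '?'.
def pvLoopA (s : List Char) (length : Int) (i : Int) (acc : List Int) : List Int :=
  if _h : i < length then
    match PySem.Chars.pyGet? s i with
    | some char => pvLoopA s length (i + 1) (if char = '?' then acc ++ [i] else acc)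
    | none => acc   -- unreachable: i is always in range
  else acc
termination_by (length - i).toNat
decreasing_by omega

def vraagtekensOplossing (oplossing : String) : List Int :=
  pvLoopA oplossing.toList (PySem.Str.len oplossing) 0 []

-- ===== PORT B =====
-- B's while True loop: idx = s.find('?', start); stop at -1, else record idx and continue at idx+1.
-- fuel is only a totality guard; it never runs out when called with length + 1.
def pvLoopB (s : List Char) : Nat → Int → List Int
  | 0, _ => []
  | fuel + 1, start =>
    let idx := PySem.Chars.findFrom s ['?'] start none
    if idx = -1 then []
    else idx :: pvLoopB s fuel (idx + 1)

def vraagtekensOplossing_alt (oplossing : String) : List Int :=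
  pvLoopB oplossing.toList (oplossing.toList.length + 1) 0

-- ===== PRECONDITION & SPEC =====
def Spec_vraagtekensOplossing (oplossing : String) (out : List Int) : Prop := out = vraagtekensOplossing_alt oplossing
instance (oplossing : String) (out : List Int) : Decidable (Spec_vraagtekensOplossing oplossing out) := by unfold Spec_vraagtekensOplossing; infer_instance

-- ===== CLAIM (what is proved, stated in full; the proofs are below) =====
def Claim_equal_vraagtekensOplossing : Prop := ∀ (oplossing : String), Dom_vraagtekensOplossing oplossing → Spec_vraagtekensOplossing oplossing (vraagtekensOplossing oplossing)

-- ===== LEMMAS AND PROOFS =====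

-- canonical form: indices (offset by off) of '?' in the list
def pvIdxs : List Char → Int → List Int
  | [], _ => []
  | c :: t, off => if c = '?' then off :: pvIdxs t (off + 1) else pvIdxs t (off + 1)

theorem pvSingleton_prefix (a : Char) (l : List Char) : [a] <+: l ↔ l.head? = some a := by
  cases l with
  | nil => simp
  | cons b t => simp [List.cons_prefix_cons, eq_comm]

theorem pvSingleton_infix (a : Char) (l : List Char) : [a] <:+: l ↔ a ∈ l := by
  constructor
  · rintro ⟨p, q, rfl⟩; simp
  · intro h
    obtain ⟨p, q, rfl⟩ := List.append_of_mem h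
    exact ⟨p, q, by simp⟩

theorem pvIdxs_nil_of (t : List Char) (off : Int) (h : '?' ∉ t) : pvIdxs t off = [] := by
  induction t generalizing off with
  | nil => simp [pvIdxs]
  | cons c t ih =>
    simp only [List.mem_cons, not_or] at h
    have hc : c ≠ '?' := fun hc => h.1 hc.symm
    simp [pvIdxs, hc, ih _ h.2]

theorem pvIdxs_split (t : List Char) (off : Int) (f : Nat) (hf : f < t.length)
    (h1 : t[f] = '?') (h2 : ∀ j (hj : j < f), t[j]'(by omega) ≠ '?') :
    pvIdxs t off = (off + f) :: pvIdxs (t.drop (f + 1)) (off + f + 1) := by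
  induction t generalizing off f with
  | nil => simp at hf
  | cons c t ih =>
    cases f with
    | zero =>
      simp only [List.getElem_cons_zero] at h1
      simp [pvIdxs, h1]
    | succ f =>
      have hc : c ≠ '?' := h2 0 (by omega)
      have := ih (off + 1) f (by simpa using hf) (by simpa using h1)
        (fun j hj => by simpa using h2 (j + 1) (by omega))
      simp only [pvIdxs, hc, if_false, List.drop_succ_cons]
      rw [this]
      push_cast
      ring_nf

theorem pvLoopA_eq (s : List Char) (i : Nat) (acc : List Int) (hi : i ≤ s.length) :
    pvLoopA s (s.length : Int) (i : Int) acc = acc ++ pvIdxs (s.drop i) (i : Int) := by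
  generalize hm : s.length - i = m
  induction m generalizing i acc with
  | zero =>
    have hieq : i = s.length := by omega
    rw [pvLoopA, dif_neg (by exact_mod_cast (by omega : ¬ i < s.length))]
    simp [hieq, pvIdxs]
  | succ m ih =>
    have hlt : i < s.length := by omega
    rw [pvLoopA, dif_pos (by exact_mod_cast hlt)]
    have hget : PySem.Chars.pyGet? s (i : Int) = some (s[i]'hlt) := by
      simp [pysem, hlt]
    rw [hget]
    show pvLoopA s ((s.length : Nat) : Int) ((i : Int) + 1)
        (if s[i]'hlt = '?' then acc ++ [(i : Int)] else acc) = acc ++ pvIdxs (s.drop i) (i : Int)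
    have hdrop : s.drop i = s[i]'hlt :: s.drop (i + 1) := (List.getElem_cons_drop hlt).symm
    have hstep : ((i : Int) + 1) = ((i + 1 : Nat) : Int) := by push_cast; ring
    by_cases hc : s[i]'hlt = '?'
    · rw [if_pos hc, hstep, ih (i + 1) _ (by omega) (by omega), hdrop]
      simp only [pvIdxs, if_pos hc, hstep]
      simp
    · rw [if_neg hc, hstep, ih (i + 1) _ (by omega) (by omega), hdrop]
      simp only [pvIdxs, if_neg hc, hstep]

theorem pvLoopB_eq (s : List Char) (fuel start : Nat) (hs : start ≤ s.length)
    (hf : s.length + 1 - start ≤ fuel) :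
    pvLoopB s fuel (start : Int) = pvIdxs (s.drop start) (start : Int) := by
  induction fuel generalizing start with
  | zero => omega
  | succ fuel ih =>
    rw [pvLoopB]
    rw [PySem.Chars.findFrom_natCast s ['?'] start hs]
    set f := PySem.Chars.find (s.drop start) ['?'] with hfdef
    by_cases h1 : f = -1
    · have hno : '?' ∉ s.drop start := by
        rw [← pvSingleton_infix]
        exact (PySem.Chars.find_eq_neg_one_iff _ _).mp h1
      simp [h1, pvIdxs_nil_of _ _ hno]
    · have hf0 : 0 ≤ f := by
        have := PySem.Chars.neg_one_le_find (s.drop start) ['?']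
        omega
      obtain ⟨hpre, hmin⟩ := PySem.Chars.find_spec (s := s.drop start) (sub := ['?']) hf0
      set fn := f.toNat with hfn
      have hfnf : (fn : Int) = f := Int.toNat_of_nonneg hf0
      have hhead : ((s.drop start).drop fn).head? = some '?' :=
        (pvSingleton_prefix _ _).mp hpre
      rw [List.drop_drop, List.head?_drop] at hhead
      have hlt : start + fn < s.length := by
        by_contra hge
        rw [List.getElem?_eq_none (by omega)] at hhead
        simp at hhead
      have hflt : fn < (s.drop start).length := by simp [List.length_drop]; omega
      have hch : (s.drop start)[fn]'hflt = '?' := by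
        have : s[start + fn]'hlt = '?' := by
          have := List.getElem?_eq_getElem hlt
          rw [this] at hhead; exact Option.some.inj hhead
        simpa [List.getElem_drop, Nat.add_comm] using this
      have hj2 : ∀ j (hj : j < fn), (s.drop start)[j]'(by omega) ≠ '?' := by
        intro j hj hcj
        apply hmin j hj
        rw [pvSingleton_prefix, List.head?_drop, List.getElem?_eq_getElem (by omega)]
        exact congrArg some hcj
      rw [pvIdxs_split (s.drop start) (start : Int) fn hflt hch hj2]
      have hsum1 : (start : Int) + f + 1 = ((start + fn + 1 : Nat) : Int) := by push_cast; omega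
      simp only [if_neg h1]
      rw [if_neg (by omega : ¬ ((start : Int) + f = -1))]
      rw [hsum1, ih (start + fn + 1) (by omega) (by omega)]
      rw [List.drop_drop, show start + (fn + 1) = start + fn + 1 by omega]
      rw [show ((start : Int) + f) = (start : Int) + (fn : Int) by omega]
      rw [show ((start + fn + 1 : Nat) : Int) = (start : Int) + (fn : Int) + 1 by push_cast; ring]

-- ===== VERDICT (by name: the statement is the Claim_ definition above) =====
theorem vraagtekensOplossing_spec : Claim_equal_vraagtekensOplossing := by
  intro s _
  show _ = _
  unfold vraagtekensOplossing vraagtekensOplossing_alt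
  rw [show PySem.Str.len s = ((s.toList.length : Nat) : Int) by simp [PySem.Str.len_eq]]
  rw [show (0 : Int) = ((0 : Nat) : Int) by simp]
  rw [pvLoopA_eq _ _ _ (by omega), pvLoopB_eq _ _ _ (by omega) (by omega)]
  simp
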